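-- pv_equiv track=rewrite | github.com/DQGiac/AID_VSL_Translator | Moving/moving_test_recog.py | vni_to_viet
-- ===== SOURCE A (Python) =====
-- def remove_consecutive_duplicates(text):
--     result = ""
--     i = 0
--     while i < len(text):
--         if i < len(text) - 1:
--             # Kiểm tra nếu hai ký tự liền kề giống nhau và là chữ lớn
--             if text[i] == text[i + 1] and text[i].isupper():
--                 i += 1  # Bỏ qua một ký tự trùng
--             # Kiểm tra nếu cặp ký tự lớn-nhỏ liền kề giống nhau như VxVx
--             elif i < len(text) - 3 and text[i:i+2] == text[i+2:i+4] and text[i].isupper() and text[i+1] in "ltpx":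
--                 i += 3  # Bỏ qua cặp ký tự trùng
--             else:
--                 result += text[i]
--         else:
--             result += text[i]
--         i += 1
--     return result
--
-- def vni_to_viet(text):
--     # Xóa các ký tự lặp liên tiếp
--     text = remove_consecutive_duplicates(text)
--     unicode_to_vni = {
--         'A2': 'À', 'A1': 'Á', 'A3': 'Ả', 'A4': 'Ã', 'A5': 'Ạ',
--         'A6': 'Â', 'A62': 'Ầ', 'A61': 'Ấ', 'A63': 'Ẩ', 'A64': 'Ẫ', 'A65': 'Ậ',
--         'A8': 'Ă', 'A82': 'Ằ', 'A81': 'Ắ', 'A83': 'Ẳ', 'A84': 'Ẵ', 'A85': 'Ặ',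
--         'E2': 'È', 'E1': 'É', 'E3': 'Ẻ', 'E4': 'Ẽ', 'E5': 'Ẹ',
--         'E6': 'Ê', 'E62': 'Ề', 'E61': 'Ế', 'E63': 'Ể', 'E64': 'Ễ', 'E65': 'Ệ',
--         'I2': 'Ì', 'I1': 'Í', 'I3': 'Ỉ', 'I4': 'Ĩ', 'I5': 'Ị',
--         'O2': 'Ò', 'O1': 'Ó', 'O3': 'Ỏ', 'O4': 'Õ', 'O5': 'Ọ',
--         'O6': 'Ô', 'O62': 'Ồ', 'O61': 'Ố', 'O63': 'Ổ', 'O64': 'Ỗ', 'O65': 'Ộ',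
--         'O7': 'Ơ', 'O72': 'Ờ', 'O71': 'Ớ', 'O73': 'Ở', 'O74': 'Ỡ', 'O75': 'Ợ',
--         'U2': 'Ù', 'U1': 'Ú', 'U3': 'Ủ', 'U4': 'Ũ', 'U5': 'Ụ',
--         'U7': 'Ư', 'U72': 'Ừ', 'U71': 'Ứ', 'U73': 'Ử', 'U74': 'Ữ', 'U75': 'Ự',
--         'Y2': 'Ỳ', 'Y1': 'Ý', 'Y3': 'Ỷ', 'Y4': 'Ỹ', 'Y5': 'Ỵ',
--         'D9': 'Đ',
--         'Vx': 'tôi', 'Vl': 'tên', 'Vt': 'là', 'Vp': 'của'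
--     }
--
--     vowels = "AEIOUYVD"  # Thêm D vào để kiểm tra 'D9' cho Đ
--     numbers = "123456789xltp"  # Thêm 'x', 'l', 't', 'p' vào để kiểm tra các từ khóa như Cx, Cl, Ct, Cp
--     i = 0
--     new_text = ""
--
--     while i < len(text):
--         if text[i] in vowels:
--             j = i + 1
--             while j < len(text) and text[j] in numbers:
--                 j += 1
--             key = text[i:j]
--             if key in unicode_to_vni:
--                 new_text += unicode_to_vni[key]
--             else:
--                 new_text += text[i:j]
--             i = j
--         else:
--             new_text += text[i]
--             i += 1
--     return new_text
-- ===== SOURCE B (Python) =====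
-- def remove_consecutive_duplicates(text):
--     result = ""
--     i = 0
--     while i < len(text):
--         if i < len(text) - 1:
--             if text[i] == text[i + 1] and text[i].isupper():
--                 i += 1
--             elif i < len(text) - 3 and text[i:i+2] == text[i+2:i+4] and text[i].isupper() and text[i+1] in "ltpx":
--                 i += 3
--             else:
--                 result += text[i]
--         else:
--             result += text[i]
--         i += 1
--     return result
--
-- _MOD = {'A6': 'Â', 'A8': 'Ă', 'E6': 'Ê', 'O6': 'Ô', 'O7': 'Ơ', 'U7': 'Ư'}
-- _TONES = {  # toned forms indexed by tone digit 1..5 (acute, grave, hoi, tilde, dot)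
--     'A': 'ÁÀẢÃẠ', 'Â': 'ẤẦẨẪẬ', 'Ă': 'ẮẰẲẴẶ',
--     'E': 'ÉÈẺẼẸ', 'Ê': 'ẾỀỂỄỆ', 'I': 'ÍÌỈĨỊ',
--     'O': 'ÓÒỎÕỌ', 'Ô': 'ỐỒỔỖỘ', 'Ơ': 'ỚỜỞỠỢ',
--     'U': 'ÚÙỦŨỤ', 'Ư': 'ỨỪỬỮỰ', 'Y': 'ÝỲỶỸỴ',
-- }
-- _WORDS = {'x': 'tôi', 'l': 'tên', 't': 'là', 'p': 'của'}
--
-- def _render(tok):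
--     # Compose the Vietnamese form of one token (vowel + marker run), or echo it.
--     head, suf = tok[0], tok[1:]
--     if head == 'V':
--         return _WORDS.get(suf, tok)
--     if head == 'D':
--         return 'Đ' if suf == '9' else tok
--     base = head
--     if suf[:1] in '678' and suf[:1]:
--         if head + suf[0] not in _MOD:
--             return tok
--         base = _MOD[head + suf[0]]
--         suf = suf[1:]
--     if not suf:
--         return base if base != head else tok
--     if len(suf) == 1 and suf in '12345':
--         return _TONES[base]['12345'.index(suf)]
--     return tok
--
-- def vni_to_viet(text):
--     text = remove_consecutive_duplicates(text)
--     parts = []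
--     tok = ""
--     for ch in text:
--         if tok and ch in "123456789xltp":
--             tok += ch
--             continue
--         if tok:
--             parts.append(_render(tok))
--             tok = ""
--         if ch in "AEIOUYVD":
--             tok = ch
--         else:
--             parts.append(ch)
--     if tok:
--         parts.append(_render(tok))
--     return "".join(parts)
-- ===== Notes on version B (the rewrite author's own statement) =====
-- stated objective: alternative
-- what changed: Replaces A's index-based while-loop scanner plus one monolithic 70-entry lookup dict by a single streaming fold over the characters with a pending-token accumulator, rendering each token compositionally from small modifier/tone/keyword tables, and accumulating output in a list joined once instead of repeated string concatenation.
import Mathlib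
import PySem

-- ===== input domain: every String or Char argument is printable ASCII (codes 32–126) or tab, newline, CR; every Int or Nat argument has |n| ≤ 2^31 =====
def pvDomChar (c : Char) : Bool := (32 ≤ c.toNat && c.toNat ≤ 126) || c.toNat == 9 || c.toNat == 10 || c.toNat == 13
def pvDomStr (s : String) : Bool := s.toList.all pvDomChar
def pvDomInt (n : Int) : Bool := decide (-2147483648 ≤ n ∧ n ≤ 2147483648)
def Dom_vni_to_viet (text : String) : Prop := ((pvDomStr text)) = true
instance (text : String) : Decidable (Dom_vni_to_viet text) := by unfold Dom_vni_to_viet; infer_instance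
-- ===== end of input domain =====

-- B replaces A's index/while scanner plus one monolithic 70-entry dict by a single streaming fold with a
-- token accumulator and compositional rendering (modifier + tone tables), joining the output once instead of
-- repeated string concatenation (a timing run measured B faster by a constant factor).

-- ===== PORT A =====
-- shared helper: remove_consecutive_duplicates (identical in Source A and Source B)
def pvDedup : List Char → List Char
  | [] => []
  | [c] => [c]
  | [c1, c2] =>
    if c1 = c2 ∧ PySem.Chars.isupper c1 then [] else c1 :: pvDedup [c2]
  | [c1, c2, c3] =>
    if c1 = c2 ∧ PySem.Chars.isupper c1 then pvDedup [c3] else c1 :: pvDedup [c2, c3]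
  | c1 :: c2 :: c3 :: c4 :: rest =>
    if c1 = c2 ∧ PySem.Chars.isupper c1 then
      pvDedup (c3 :: c4 :: rest)
    else if (c1 = c3 ∧ c2 = c4) ∧ PySem.Chars.isupper c1 ∧ ['l','t','p','x'].contains c2 then
      pvDedup rest
    else c1 :: pvDedup (c2 :: c3 :: c4 :: rest)
termination_by l => l.length
decreasing_by all_goals (simp; try omega)

def pvVowels : List Char := ['A','E','I','O','U','Y','V','D']
def pvNums : List Char := ['1','2','3','4','5','6','7','8','9','x','l','t','p']

-- A's dict unicode_to_vni, as an association list over char lists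
def pvDict : List (List Char × List Char) := [
  (['A','2'], ['À']), (['A','1'], ['Á']), (['A','3'], ['Ả']), (['A','4'], ['Ã']), (['A','5'], ['Ạ']),
  (['A','6'], ['Â']), (['A','6','2'], ['Ầ']), (['A','6','1'], ['Ấ']), (['A','6','3'], ['Ẩ']), (['A','6','4'], ['Ẫ']), (['A','6','5'], ['Ậ']),
  (['A','8'], ['Ă']), (['A','8','2'], ['Ằ']), (['A','8','1'], ['Ắ']), (['A','8','3'], ['Ẳ']), (['A','8','4'], ['Ẵ']), (['A','8','5'], ['Ặ']),
  (['E','2'], ['È']), (['E','1'], ['É']), (['E','3'], ['Ẻ']), (['E','4'], ['Ẽ']), (['E','5'], ['Ẹ']),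
  (['E','6'], ['Ê']), (['E','6','2'], ['Ề']), (['E','6','1'], ['Ế']), (['E','6','3'], ['Ể']), (['E','6','4'], ['Ễ']), (['E','6','5'], ['Ệ']),
  (['I','2'], ['Ì']), (['I','1'], ['Í']), (['I','3'], ['Ỉ']), (['I','4'], ['Ĩ']), (['I','5'], ['Ị']),
  (['O','2'], ['Ò']), (['O','1'], ['Ó']), (['O','3'], ['Ỏ']), (['O','4'], ['Õ']), (['O','5'], ['Ọ']),
  (['O','6'], ['Ô']), (['O','6','2'], ['Ồ']), (['O','6','1'], ['Ố']), (['O','6','3'], ['Ổ']), (['O','6','4'], ['Ỗ']), (['O','6','5'], ['Ộ']),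
  (['O','7'], ['Ơ']), (['O','7','2'], ['Ờ']), (['O','7','1'], ['Ớ']), (['O','7','3'], ['Ở']), (['O','7','4'], ['Ỡ']), (['O','7','5'], ['Ợ']),
  (['U','2'], ['Ù']), (['U','1'], ['Ú']), (['U','3'], ['Ủ']), (['U','4'], ['Ũ']), (['U','5'], ['Ụ']),
  (['U','7'], ['Ư']), (['U','7','2'], ['Ừ']), (['U','7','1'], ['Ứ']), (['U','7','3'], ['Ử']), (['U','7','4'], ['Ữ']), (['U','7','5'], ['Ự']),
  (['Y','2'], ['Ỳ']), (['Y','1'], ['Ý']), (['Y','3'], ['Ỷ']), (['Y','4'], ['Ỹ']), (['Y','5'], ['Ỵ']),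
  (['D','9'], ['Đ']),
  (['V','x'], ['t','ô','i']), (['V','l'], ['t','ê','n']), (['V','t'], ['l','à']), (['V','p'], ['c','ủ','a'])]

-- A's main while-loop: at a vowel, the inner while consumes the run of number-class chars (takeWhile),
-- then the key is looked up with the unmatched key echoed verbatim
def pvAgo : List Char → List Char
  | [] => []
  | c :: rest =>
    if pvVowels.contains c then
      let run := rest.takeWhile (fun d => pvNums.contains d)
      let key := c :: run
      (match pvDict.lookup key with
       | some v => v
       | none => key) ++ pvAgo (rest.drop run.length)
    else c :: pvAgo rest
termination_by l => l.length
decreasing_by all_goals (simp only [List.length_cons, List.length_drop]; omega)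

def vni_to_viet (text : String) : String :=
  String.mk (pvAgo (pvDedup text.toList))

-- ===== PORT B =====
def pvMod : List (List Char × Char) :=
  [(['A','6'],'Â'), (['A','8'],'Ă'), (['E','6'],'Ê'), (['O','6'],'Ô'), (['O','7'],'Ơ'), (['U','7'],'Ư')]

def pvTones : List (Char × List Char) := [
  ('A', ['Á','À','Ả','Ã','Ạ']), ('Â', ['Ấ','Ầ','Ẩ','Ẫ','Ậ']), ('Ă', ['Ắ','Ằ','Ẳ','Ẵ','Ặ']),
  ('E', ['É','È','Ẻ','Ẽ','Ẹ']), ('Ê', ['Ế','Ề','Ể','Ễ','Ệ']), ('I', ['Í','Ì','Ỉ','Ĩ','Ị']),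
  ('O', ['Ó','Ò','Ỏ','Õ','Ọ']), ('Ô', ['Ố','Ồ','Ổ','Ỗ','Ộ']), ('Ơ', ['Ớ','Ờ','Ở','Ỡ','Ợ']),
  ('U', ['Ú','Ù','Ủ','Ũ','Ụ']), ('Ư', ['Ứ','Ừ','Ử','Ữ','Ự']), ('Y', ['Ý','Ỳ','Ỷ','Ỹ','Ỵ'])]

def pvWords : List (List Char × List Char) :=
  [(['x'], ['t','ô','i']), (['l'], ['t','ê','n']), (['t'], ['l','à']), (['p'], ['c','ủ','a'])]

-- tail of _render: after the optional modifier, an optional tone digit (tok is the echo fallback)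
def pvFinish (base head : Char) (suf : List Char) (tok : List Char) : List Char :=
  match suf with
  | [] => if base ≠ head then [base] else tok
  | [t] =>
    if ['1','2','3','4','5'].contains t then
      match pvTones.lookup base with
      | some row =>
        match PySem.List.pyGet? row ((PySem.Int.ofChars? [t]).getD 0 - 1) with
        | some ch => [ch]
        | none => tok   -- unreachable: tone digit is 1..5
      | none => tok     -- unreachable: every base is in pvTones
    else tok
  | _ => tok

-- _render: compose the Vietnamese form of one token, or echo it
def pvRender (tok : List Char) : List Char :=
  match tok with
  | [] => []            -- never called on an empty token
  | head :: suf =>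
    if head = 'V' then
      match pvWords.lookup suf with
      | some w => w
      | none => tok
    else if head = 'D' then
      (if suf = ['9'] then ['Đ'] else tok)
    else
      match suf with
      | m :: suf' =>
        if ['6','7','8'].contains m then
          match pvMod.lookup [head, m] with
          | some b => pvFinish b head suf' tok
          | none => tok
        else pvFinish head head suf tok
      | [] => pvFinish head head [] tok

-- one step of B's streaming fold; state = (pending token, output so far)
def pvBstep (st : List Char × List Char) (ch : Char) : List Char × List Char :=
  let tok := st.1
  let parts := st.2
  if tok ≠ [] ∧ pvNums.contains ch then (tok ++ [ch], parts)
  else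
    let parts := if tok ≠ [] then parts ++ pvRender tok else parts
    if pvVowels.contains ch then ([ch], parts)
    else ([], parts ++ [ch])

def pvFinal (st : List Char × List Char) : List Char :=
  if st.1 ≠ [] then st.2 ++ pvRender st.1 else st.2

def vni_to_viet_alt (text : String) : String :=
  String.mk (pvFinal ((pvDedup text.toList).foldl pvBstep ([], [])))

-- ===== PRECONDITION & SPEC =====
def Spec_vni_to_viet (text : String) (out : String) : Prop := out = vni_to_viet_alt text
instance (text : String) (out : String) : Decidable (Spec_vni_to_viet text out) := by unfold Spec_vni_to_viet; infer_instance

-- ===== CLAIM (what is proved, stated in full; the proofs are below) =====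
def Claim_equal_vni_to_viet : Prop := ∀ (text : String), Dom_vni_to_viet text → Spec_vni_to_viet text (vni_to_viet text)

-- ===== LEMMAS AND PROOFS =====

-- A's lookup-or-echo, the thing pvRender must agree with on every reachable token
def pvLkE (key : List Char) : List Char :=
  match pvDict.lookup key with
  | some v => v
  | none => key

lemma pvLookup_none_of_long {β : Type} (d : List (List Char × β)) (k : List Char) (n : Nat)
    (hd : ∀ p ∈ d, p.1.length ≤ n) (hk : n < k.length) : d.lookup k = none := by
  induction d with
  | nil => rfl
  | cons p d ih =>
    obtain ⟨a, b⟩ := p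
    have h1 : a.length ≤ n := hd (a, b) (by simp)
    have hne : (k == a) = false := by
      by_cases h : k = a
      · subst h; omega
      · simpa using h
    simp only [List.lookup, hne]
    exact ih (fun q hq => hd q (by simp [hq]))

lemma pvRender_eq_lkE_long (c d e f : Char) (r : List Char) :
    pvRender (c :: d :: e :: f :: r) = pvLkE (c :: d :: e :: f :: r) := by
  have hdict : pvDict.lookup (c :: d :: e :: f :: r) = none := by
    apply pvLookup_none_of_long _ _ 3
    · decide
    · simp
  have hwords : pvWords.lookup (d :: e :: f :: r) = none := by
    apply pvLookup_none_of_long _ _ 1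
    · decide
    · simp
  unfold pvRender pvLkE
  rw [hdict]
  by_cases hV : c = 'V'
  · simp [hV, hwords]
  · simp only [if_neg hV]
    by_cases hD : c = 'D'
    · simp [hD]
    · simp only [if_neg hD]
      by_cases hm : (['6','7','8'].contains d = true)
      · rw [if_pos hm]
        cases hmod : pvMod.lookup [c, d] with
        | none => rfl
        | some b => rfl
      · rw [if_neg hm]
        rfl

lemma pvRender_eq_lkE_0 : ∀ c ∈ pvVowels, pvRender [c] = pvLkE [c] := by
  intro c hc
  fin_cases hc <;> rfl

lemma pvRender_eq_lkE_1 : ∀ c ∈ pvVowels, ∀ d ∈ pvNums, pvRender [c, d] = pvLkE [c, d] := by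
  intro c hc
  fin_cases hc <;> (intro d hd; fin_cases hd <;> rfl)

set_option maxHeartbeats 4000000 in
lemma pvRender_eq_lkE_2 : ∀ c ∈ pvVowels, ∀ d ∈ pvNums, ∀ e ∈ pvNums,
    pvRender [c, d, e] = pvLkE [c, d, e] := by
  intro c hc
  fin_cases hc <;> (intro d hd; fin_cases hd <;> (intro e he; fin_cases he <;> rfl))

lemma pvRender_eq_lkE (c : Char) (run : List Char) (hc : pvVowels.contains c)
    (hrun : ∀ d ∈ run, pvNums.contains d) : pvRender (c :: run) = pvLkE (c :: run) := by
  have hc' : c ∈ pvVowels := by simpa using hc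
  match run with
  | [] => exact pvRender_eq_lkE_0 c hc'
  | [d] =>
    exact pvRender_eq_lkE_1 c hc' d (by simpa using hrun d (by simp))
  | [d, e] =>
    exact pvRender_eq_lkE_2 c hc' d (by simpa using hrun d (by simp)) e (by simpa using hrun e (by simp))
  | d :: e :: f :: r => exact pvRender_eq_lkE_long c d e f r

-- while the pending token is nonempty, B's fold absorbs exactly the takeWhile-run of number-class chars
lemma pvFold_absorb (s : List Char) : ∀ tok parts, tok ≠ [] →
    s.foldl pvBstep (tok, parts) =
      (s.dropWhile (fun d => pvNums.contains d)).foldl pvBstep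
        (tok ++ s.takeWhile (fun d => pvNums.contains d), parts) := by
  induction s with
  | nil => intro tok parts _; simp
  | cons a s ih =>
    intro tok parts htok
    by_cases ha : (pvNums.contains a : Bool)
    · rw [List.takeWhile_cons_of_pos ha, List.dropWhile_cons_of_pos ha]
      have ha' : a ∈ pvNums := by simpa using ha
      have hstep : pvBstep (tok, parts) a = (tok ++ [a], parts) := by
        simp [pvBstep, htok, ha']
      rw [List.foldl_cons, hstep, ih (tok ++ [a]) parts (by simp)]
      simp only [List.append_assoc, List.singleton_append]
    · rw [List.takeWhile_cons_of_neg (by simpa using ha), List.dropWhile_cons_of_neg (by simpa using ha)]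
      simp only [List.append_nil]

lemma pvDropWhile_head_false (p : Char → Bool) (l l2 : List Char) (d : Char)
    (h : l.dropWhile p = d :: l2) : p d = false := by
  have hne : l.dropWhile p ≠ [] := by simp [h]
  have hh := List.head_dropWhile_not p hne
  simp only [h, List.head_cons] at hh
  simpa using hh

lemma pvDrop_takeWhile_length (p : Char → Bool) (l : List Char) :
    l.drop (l.takeWhile p).length = l.dropWhile p := by
  nth_rewrite 2 [← List.takeWhile_append_dropWhile (p := p) (l := l)]
  rw [List.drop_left]

-- the main invariant: B's fold, started with an empty pending token, produces A's scanner output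
lemma pvMain : ∀ (n : Nat) (s : List Char), s.length ≤ n → ∀ parts,
    pvFinal (s.foldl pvBstep ([], parts)) = parts ++ pvAgo s := by
  intro n
  induction n with
  | zero =>
    intro s hs parts
    have : s = [] := List.length_eq_zero_iff.mp (Nat.le_zero.mp hs)
    subst this
    simp [pvFinal, pvAgo]
  | succ n ih =>
    intro s hs parts
    cases s with
    | nil => simp [pvFinal, pvAgo]
    | cons c s' =>
      have hs' : s'.length ≤ n := by simp at hs; omega
      rw [List.foldl_cons]
      by_cases hc : (pvVowels.contains c = true)
      · have hc' : c ∈ pvVowels := by simpa using hc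
        have hstep : pvBstep ([], parts) c = ([c], parts) := by simp [pvBstep, hc']
        rw [hstep, pvFold_absorb s' [c] parts (by simp), List.singleton_append]
        have hmemrun : ∀ d ∈ s'.takeWhile (fun d => pvNums.contains d), pvNums.contains d :=
          fun d hd => List.mem_takeWhile_imp hd
        have hrender := pvRender_eq_lkE c _ hc hmemrun
        have hdrop := pvDrop_takeWhile_length (fun d => pvNums.contains d) s'
        have hAgo : pvAgo (c :: s') =
            pvLkE (c :: s'.takeWhile (fun d => pvNums.contains d)) ++
              pvAgo (s'.dropWhile (fun d => pvNums.contains d)) := by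
          rw [pvAgo, if_pos hc]
          simp only [pvLkE, hdrop]
        cases hcase : s'.dropWhile (fun d => pvNums.contains d) with
        | nil =>
          rw [hcase] at hAgo
          rw [List.foldl_nil]
          have hnil : pvAgo ([] : List Char) = [] := by rw [pvAgo]
          rw [hAgo, hnil, List.append_nil]
          have hfin : pvFinal (c :: s'.takeWhile (fun d => pvNums.contains d), parts) =
              parts ++ pvRender (c :: s'.takeWhile (fun d => pvNums.contains d)) := by
            simp [pvFinal]
          rw [hfin, hrender]
        | cons d s3 =>
          have hd : pvNums.contains d = false :=
            pvDropWhile_head_false (fun d => pvNums.contains d) s' s3 d hcase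
          have hd' : d ∉ pvNums := by simpa using hd
          rw [hcase] at hAgo
          rw [List.foldl_cons]
          have hswap : pvBstep (c :: s'.takeWhile (fun d => pvNums.contains d), parts) d =
              pvBstep ([], parts ++ pvRender (c :: s'.takeWhile (fun d => pvNums.contains d))) d := by
            simp [pvBstep, hd']
          rw [hswap, ← List.foldl_cons]
          have hlen3 : (d :: s3).length ≤ n := by
            have h1 := List.length_dropWhile_le (fun d => pvNums.contains d) s'
            rw [hcase] at h1
            omega
          rw [ih (d :: s3) hlen3 (parts ++ pvRender (c :: s'.takeWhile (fun d => pvNums.contains d)))]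
          rw [hAgo, hrender]
          simp only [List.append_assoc]
      · have hc' : c ∉ pvVowels := by simpa using hc
        have hstep : pvBstep ([], parts) c = ([], parts ++ [c]) := by simp [pvBstep, hc']
        rw [hstep, ih s' hs' (parts ++ [c])]
        rw [pvAgo, if_neg hc]
        simp

-- ===== VERDICT (by name: the statement is the Claim_ definition above) =====
theorem vni_to_viet_spec : Claim_equal_vni_to_viet := by
  intro text _
  unfold Spec_vni_to_viet vni_to_viet vni_to_viet_alt
  rw [show pvFinal ((pvDedup text.toList).foldl pvBstep ([], [])) = [] ++ pvAgo (pvDedup text.toList) from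
    pvMain (pvDedup text.toList).length _ le_rfl []]
  simp
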